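-- pv_equiv track=rewrite | github.com/Adr802/reto-asistente-2025-q1 | assistant/utils/ProcessPDF.py | _clean_sensitive_data
-- ===== SOURCE A (Python) =====
-- def _clean_sensitive_data(lista_de_textos):
--     list_clean = []
--     for texto_completo in lista_de_textos:
--
--         # Normalizar el texto eliminando espacios adicionales
--         texto_normalizado = " ".join(texto_completo.split())
--
--         # Hacer el split con la cadena "DETALLE DE MOVIMIENTOS" después de la normalización
--         partes = texto_normalizado.split("DETALLE DE MOVIMIENTOS")
--
--         # La segunda parte de la lista `partes` contiene el texto después de la división
--         texto_despues = partes[1] if len(partes) > 1 else ""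
--         list_clean.append(texto_despues)
--
--     # Unir todos los fragmentos extraídos en una sola cadena
--     texto_unido = "".join(list_clean)
--     return texto_unido
-- ===== SOURCE B (Python) =====
-- _M = "DETALLE DE MOVIMIENTOS"
--
-- def _clean_sensitive_data(lista_de_textos):
--     # Streaming automaton: one global char accumulator; per text, scan the
--     # normalized string left to right counting non-overlapping marker hits and
--     # copying characters seen while exactly one hit has occurred.
--     chunks = []
--     for texto in lista_de_textos:
--         t = " ".join(texto.split())
--         i, seen = 0, 0
--         while i < len(t) and seen < 2:
--             if t.startswith(_M, i):
--                 seen += 1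
--                 i += len(_M)
--             else:
--                 if seen == 1:
--                     chunks.append(t[i])
--                 i += 1
--     return "".join(chunks)
-- ===== Notes on version B (the rewrite author's own statement) =====
-- stated objective: alternative
-- what changed: Replaces split-into-parts-then-index with a single-pass streaming automaton: each normalized text is scanned character by character with a non-overlapping marker-occurrence counter, characters are copied into one global accumulator only while the counter is exactly 1, so no parts list or per-text segment strings are ever built.
import Mathlib
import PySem

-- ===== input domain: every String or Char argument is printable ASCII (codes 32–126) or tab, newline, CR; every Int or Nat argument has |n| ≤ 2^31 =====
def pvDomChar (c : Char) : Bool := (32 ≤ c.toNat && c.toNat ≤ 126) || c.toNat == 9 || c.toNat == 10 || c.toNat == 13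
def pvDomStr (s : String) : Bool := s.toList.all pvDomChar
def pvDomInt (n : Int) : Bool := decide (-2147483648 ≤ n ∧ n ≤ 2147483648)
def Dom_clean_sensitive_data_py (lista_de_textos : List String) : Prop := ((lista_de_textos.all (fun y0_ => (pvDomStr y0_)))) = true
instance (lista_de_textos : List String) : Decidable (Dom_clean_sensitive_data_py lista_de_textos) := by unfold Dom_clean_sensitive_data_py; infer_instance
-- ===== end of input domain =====

-- B replaces A's split-into-parts construction with a single-pass streaming automaton
-- (occurrence counter + one global char accumulator); same cost (objective: alternative).

def pvMarker : List Char := "DETALLE DE MOVIMIENTOS".toList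

-- ===== PORT A =====
def clean_sensitive_data_py (lista_de_textos : List String) : String :=
  let list_clean := lista_de_textos.foldl (fun acc texto_completo =>
    let texto_normalizado := PySem.Chars.join " ".toList (PySem.Chars.split₀ texto_completo.toList)
    let partes := PySem.Chars.splitOn texto_normalizado pvMarker
    let texto_despues := if partes.length > 1 then partes.getD 1 [] else []
    acc ++ [texto_despues]) []
  String.ofList (PySem.Chars.join [] list_clean)

-- ===== PORT B =====
-- the while loop of Source B: state (remaining suffix of t, seen, chunks accumulator)
def pvScanB : List Char → Nat → List Char → List Char
  | [], _, chunks => chunks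
  | c :: rest, seen, chunks =>
    if seen ≥ 2 then chunks
    else if pvMarker.isPrefixOf (c :: rest) then
      pvScanB (rest.drop (pvMarker.length - 1)) (seen + 1) chunks
    else
      pvScanB rest seen (if seen = 1 then chunks ++ [c] else chunks)
termination_by t _ _ => t.length
decreasing_by
  · simp only [List.length_drop, List.length_cons]; omega
  · simp only [List.length_cons]; omega

def clean_sensitive_data_py_alt (lista_de_textos : List String) : String :=
  String.ofList (lista_de_textos.foldl
    (fun chunks texto =>
      pvScanB (PySem.Chars.join " ".toList (PySem.Chars.split₀ texto.toList)) 0 chunks)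
    [])

-- ===== PRECONDITION & SPEC =====
def Spec_clean_sensitive_data_py (lista_de_textos : List String) (out : String) : Prop := out = clean_sensitive_data_py_alt lista_de_textos
instance (lista_de_textos : List String) (out : String) : Decidable (Spec_clean_sensitive_data_py lista_de_textos out) := by unfold Spec_clean_sensitive_data_py; infer_instance

-- ===== CLAIM (what is proved, stated in full; the proofs are below) =====
def Claim_equal_clean_sensitive_data_py : Prop := ∀ (lista_de_textos : List String), Dom_clean_sensitive_data_py lista_de_textos → Spec_clean_sensitive_data_py lista_de_textos (clean_sensitive_data_py lista_de_textos)

-- ===== LEMMAS AND PROOFS =====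

-- splitOn.go prepends acc.reverse to its result
theorem pv_go_acc (sep : List Char) (fuel : Nat) :
    ∀ (l cur : List Char) (acc : List (List Char)), PySem.Chars.splitOn.go sep fuel l cur acc
      = acc.reverse ++ PySem.Chars.splitOn.go sep fuel l cur [] := by
  induction fuel with
  | zero => intro l cur acc; simp [PySem.Chars.splitOn.go]
  | succ f ih =>
    intro l cur acc
    cases l with
    | nil => simp [PySem.Chars.splitOn.go]
    | cons c rest =>
      rw [PySem.Chars.splitOn.go, PySem.Chars.splitOn.go]
      split_ifs with h
      · rw [ih _ _ (cur.reverse :: acc), ih _ _ [cur.reverse]]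
        simp
      · exact ih _ _ acc

-- fuel is irrelevant once it dominates the length
theorem pv_go_fuel (sep : List Char) (hsep : sep ≠ []) (f1 : Nat) :
    ∀ (f2 : Nat) (l cur : List Char) (acc : List (List Char)), l.length ≤ f1 → l.length ≤ f2 →
      PySem.Chars.splitOn.go sep f1 l cur acc = PySem.Chars.splitOn.go sep f2 l cur acc := by
  induction f1 with
  | zero =>
    intro f2 l cur acc h1 h2
    have : l = [] := by cases l <;> simp_all
    subst this
    cases f2 <;> simp [PySem.Chars.splitOn.go]
  | succ f ih =>
    intro f2 l cur acc h1 h2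
    cases l with
    | nil => cases f2 <;> simp [PySem.Chars.splitOn.go]
    | cons c rest =>
      cases f2 with
      | zero => simp at h2
      | succ g =>
        rw [PySem.Chars.splitOn.go, PySem.Chars.splitOn.go]
        split_ifs with h
        · have hs : 1 ≤ sep.length := by cases sep <;> simp_all
          apply ih
          · simp only [List.length_drop, List.length_cons] at h1 ⊢; omega
          · simp only [List.length_drop, List.length_cons] at h2 ⊢; omega
        · apply ih
          · simp at h1 ⊢; omega
          · simp at h2 ⊢; omega

-- no occurrence: everything lands in the current chunk
theorem pv_go_no (sep : List Char) (fuel : Nat) :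
    ∀ (l cur : List Char) (acc : List (List Char)), ¬ sep <:+: l → l.length ≤ fuel →
      PySem.Chars.splitOn.go sep fuel l cur acc = acc.reverse ++ [cur.reverse ++ l] := by
  induction fuel with
  | zero =>
    intro l cur acc h h1
    have : l = [] := by cases l <;> simp_all
    subst this
    simp [PySem.Chars.splitOn.go]
  | succ f ih =>
    intro l cur acc h h1
    cases l with
    | nil => simp [PySem.Chars.splitOn.go]
    | cons c rest =>
      rw [PySem.Chars.splitOn.go]
      split_ifs with hp
      · exact absurd ((List.isPrefixOf_iff_prefix.mp hp).isInfix) h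
      · rw [ih rest (c :: cur) acc (fun hi => h (hi.trans (List.suffix_cons c rest).isInfix)) (by simp at h1 ⊢; omega)]
        simp

theorem pv_splitOn_no (sep l : List Char) (h : ¬ sep <:+: l) :
    PySem.Chars.splitOn l sep = [l] := by
  unfold PySem.Chars.splitOn
  rw [pv_go_no sep (l.length + 1) l [] [] h (by omega)]
  simp

-- after the first occurrence at i, the head chunk splits off and go restarts
theorem pv_go_occ (sep : List Char) (hsep : sep ≠ []) :
    ∀ (i fuel : Nat) (l cur : List Char) (acc : List (List Char)),
      sep <+: l.drop i → (∀ j < i, ¬ sep <+: l.drop j) → l.length < fuel →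
      PySem.Chars.splitOn.go sep fuel l cur acc
        = acc.reverse ++ (cur.reverse ++ l.take i) :: PySem.Chars.splitOn (l.drop (i + sep.length)) sep := by
  intro i
  induction i with
  | zero =>
    intro fuel l cur acc hp hmin hf
    cases fuel with
    | zero => omega
    | succ f =>
      cases l with
      | nil =>
        simp at hp
        exact absurd hp hsep
      | cons c rest =>
        rw [PySem.Chars.splitOn.go]
        rw [if_pos (List.isPrefixOf_iff_prefix.mpr (by simpa using hp))]
        rw [pv_go_acc]
        rw [pv_go_fuel sep hsep f ((List.drop sep.length (c :: rest)).length + 1) _ _ _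
          (by simp only [List.length_drop, List.length_cons] at hf ⊢; omega) (by omega)]
        simp [PySem.Chars.splitOn]
  | succ i ih =>
    intro fuel l cur acc hp hmin hf
    cases fuel with
    | zero => omega
    | succ f =>
      cases l with
      | nil => simp at hp; exact absurd hp hsep
      | cons c rest =>
        rw [PySem.Chars.splitOn.go]
        rw [if_neg (by
          intro hpre
          exact hmin 0 (by omega) (by simpa using List.isPrefixOf_iff_prefix.mp hpre))]
        rw [ih f rest (c :: cur) acc (by simpa using hp)
          (fun j hj => by simpa using hmin (j+1) (by omega))
          (by simp only [List.length_cons] at hf; omega)]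
        have : List.drop (i + sep.length) rest = List.drop (i + 1 + sep.length) (c :: rest) := by
          rw [show i + 1 + sep.length = (i + sep.length) + 1 by omega, List.drop_succ_cons]
        rw [this]; simp

theorem pv_splitOn_cons (sep l : List Char) (hsep : sep ≠ []) (i : Nat)
    (hp : sep <+: l.drop i) (hmin : ∀ j < i, ¬ sep <+: l.drop j) :
    PySem.Chars.splitOn l sep = l.take i :: PySem.Chars.splitOn (l.drop (i + sep.length)) sep := by
  unfold PySem.Chars.splitOn
  rw [pv_go_occ sep hsep i (l.length + 1) l [] [] hp hmin (by omega)]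
  simp [PySem.Chars.splitOn]

theorem pv_marker_ne : pvMarker ≠ [] := by decide

-- A's per-text value, used to characterize both ports
def pvSegA (t : List Char) : List Char :=
  let partes := PySem.Chars.splitOn t pvMarker
  if partes.length > 1 then partes.getD 1 [] else []

-- ----- scan-automaton lemmas -----

-- seen ≥ 2: the automaton halts immediately
theorem pv_scan_done (t chunks : List Char) (seen : Nat) (h : 2 ≤ seen) :
    pvScanB t seen chunks = chunks := by
  cases t with
  | nil => rw [pvScanB]
  | cons c rest => rw [pvScanB, if_pos h]

-- seen = 1, no occurrence: the whole suffix is copied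
theorem pv_scan1_no : ∀ (t chunks : List Char), ¬ pvMarker <:+: t →
    pvScanB t 1 chunks = chunks ++ t := by
  intro t
  induction t with
  | nil => intro chunks _; simp [pvScanB]
  | cons c rest ih =>
    intro chunks h
    rw [pvScanB, if_neg (by omega),
      if_neg (fun hp => h (List.isPrefixOf_iff_prefix.mp hp).isInfix)]
    rw [if_pos rfl, ih _ (fun hi => h (hi.trans (List.suffix_cons c rest).isInfix))]
    simp

-- seen = 0, no occurrence: nothing is copied
theorem pv_scan0_no : ∀ (t chunks : List Char), ¬ pvMarker <:+: t →
    pvScanB t 0 chunks = chunks := by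
  intro t
  induction t with
  | nil => intro chunks _; rw [pvScanB]
  | cons c rest ih =>
    intro chunks h
    rw [pvScanB, if_neg (by omega),
      if_neg (fun hp => h (List.isPrefixOf_iff_prefix.mp hp).isInfix)]
    rw [if_neg (by omega)]
    exact ih _ (fun hi => h (hi.trans (List.suffix_cons c rest).isInfix))

-- seen = 1, first occurrence at i: exactly the first i characters are copied
theorem pv_scan1_occ : ∀ (i : Nat) (t chunks : List Char),
    pvMarker <+: t.drop i → (∀ j < i, ¬ pvMarker <+: t.drop j) →
    pvScanB t 1 chunks = chunks ++ t.take i := by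
  intro i
  induction i with
  | zero =>
    intro t chunks hp _
    cases t with
    | nil => exact absurd (by simpa using hp) pv_marker_ne
    | cons c rest =>
      rw [pvScanB, if_neg (by omega),
        if_pos (List.isPrefixOf_iff_prefix.mpr (by simpa using hp))]
      rw [pv_scan_done _ _ _ (by omega)]
      simp
  | succ i ih =>
    intro t chunks hp hmin
    cases t with
    | nil => exact absurd (by simpa using hp) pv_marker_ne
    | cons c rest =>
      rw [pvScanB, if_neg (by omega),
        if_neg (fun hpre => hmin 0 (by omega) (by simpa using List.isPrefixOf_iff_prefix.mp hpre))]
      rw [if_pos rfl, ih rest _ (by simpa using hp)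
        (fun j hj => by simpa using hmin (j+1) (by omega))]
      simp

-- seen = 0, first occurrence at i: skip to just past it with seen = 1
theorem pv_scan0_occ : ∀ (i : Nat) (t chunks : List Char),
    pvMarker <+: t.drop i → (∀ j < i, ¬ pvMarker <+: t.drop j) →
    pvScanB t 0 chunks = pvScanB (t.drop (i + pvMarker.length)) 1 chunks := by
  intro i
  induction i with
  | zero =>
    intro t chunks hp _
    cases t with
    | nil => exact absurd (by simpa using hp) pv_marker_ne
    | cons c rest =>
      rw [pvScanB, if_neg (by omega),
        if_pos (List.isPrefixOf_iff_prefix.mpr (by simpa using hp))]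
      have : rest.drop (pvMarker.length - 1) = (c :: rest).drop (0 + pvMarker.length) := by
        have h22 : pvMarker.length = 22 := by decide
        rw [Nat.zero_add, h22]
        rfl
      rw [this]
  | succ i ih =>
    intro t chunks hp hmin
    cases t with
    | nil => exact absurd (by simpa using hp) pv_marker_ne
    | cons c rest =>
      rw [pvScanB, if_neg (by omega),
        if_neg (fun hpre => hmin 0 (by omega) (by simpa using List.isPrefixOf_iff_prefix.mp hpre))]
      rw [if_neg (by omega), ih rest _ (by simpa using hp)
        (fun j hj => by simpa using hmin (j+1) (by omega))]
      rw [show i + 1 + pvMarker.length = (i + pvMarker.length) + 1 by omega, List.drop_succ_cons]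

-- per normalized text: one automaton run appends exactly A's segment
theorem pv_scan_eq_segA (t chunks : List Char) :
    pvScanB t 0 chunks = chunks ++ pvSegA t := by
  unfold pvSegA
  by_cases h : pvMarker <:+: t
  · have hf : 0 ≤ PySem.Chars.find t pvMarker :=
      (PySem.Chars.find_nonneg_iff (s := t) (sub := pvMarker)).mpr h
    obtain ⟨hp, hmin⟩ := PySem.Chars.find_spec (s := t) (sub := pvMarker) hf
    set i := (PySem.Chars.find t pvMarker).toNat with hi
    rw [pv_scan0_occ i t chunks hp hmin,
      pv_splitOn_cons pvMarker t pv_marker_ne i hp hmin]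
    set rest := t.drop (i + pvMarker.length) with hr
    by_cases h2 : pvMarker <:+: rest
    · have hf2 : 0 ≤ PySem.Chars.find rest pvMarker :=
        (PySem.Chars.find_nonneg_iff (s := rest) (sub := pvMarker)).mpr h2
      obtain ⟨hp2, hmin2⟩ := PySem.Chars.find_spec (s := rest) (sub := pvMarker) hf2
      rw [pv_scan1_occ _ rest chunks hp2 hmin2,
        pv_splitOn_cons pvMarker rest pv_marker_ne _ hp2 hmin2]
      simp
    · rw [pv_scan1_no rest chunks h2, pv_splitOn_no pvMarker rest h2]
      simp
  · rw [pv_scan0_no t chunks h, pv_splitOn_no pvMarker t h]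
    simp

theorem pv_foldl_snoc {α β : Type} (g : α → β) :
    ∀ (xs : List α) (acc : List β),
      xs.foldl (fun a t => a ++ [g t]) acc = acc ++ xs.map g := by
  intro xs
  induction xs with
  | nil => simp
  | cons x xs ih => intro acc; simp [List.foldl, ih]

-- join with empty separator is concatenation
theorem pv_join_nil_flatten : ∀ (l : List (List Char)),
    PySem.Chars.join [] l = l.flatten := by
  intro l
  induction l with
  | nil => rfl
  | cons a l ih =>
    cases l with
    | nil => simp [PySem.Chars.join, List.intercalate]
    | cons b l' => rw [PySem.Chars.join_cons_cons, ih]; simp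

-- B's fold accumulates the concatenation of A's segments
theorem pv_foldB (g : String → List Char) :
    ∀ (xs : List String) (chunks : List Char),
      xs.foldl (fun acc t => pvScanB (g t) 0 acc) chunks
        = chunks ++ (xs.map (fun t => pvSegA (g t))).flatten := by
  intro xs
  induction xs with
  | nil => simp
  | cons x xs ih =>
    intro chunks
    simp only [List.foldl, List.map, List.flatten]
    rw [pv_scan_eq_segA, ih]
    simp

-- ===== VERDICT (by name: the statement is the Claim_ definition above) =====
theorem clean_sensitive_data_py_spec : Claim_equal_clean_sensitive_data_py := by
  intro xs _
  unfold Spec_clean_sensitive_data_py clean_sensitive_data_py clean_sensitive_data_py_alt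
  simp only [pv_foldl_snoc, List.nil_append, pv_foldB, pv_join_nil_flatten]
  simp [pvSegA]
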